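-- pv_equiv track=rewrite | github.com/walidoot/shippage | scripts/parse-tokens.py | dir_name_to_domain
-- ===== SOURCE A (Python) =====
-- def dir_name_to_domain(dir_name: str) -> str:
--     """Convert a sanitized directory name back to a domain-like string."""
--     # Replace underscores back to dots/slashes where sensible
--     # "stripe_com" -> "stripe.com", "vercel_com" -> "vercel.com"
--     # Handle common TLDs
--     for tld in [".com", ".app", ".dev", ".io", ".so", ".co", ".ai", ".sh",
--                 ".tech", ".design", ".rest"]:
--         sanitized_tld = tld.replace(".", "_")
--         if dir_name.endswith(sanitized_tld):
--             prefix = dir_name[: -len(sanitized_tld)]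
--             return prefix.replace("_", ".") + tld
--
--     # Fallback: replace the last underscore with a dot
--     parts = dir_name.rsplit("_", 1)
--     if len(parts) == 2:
--         return f"{parts[0].replace('_', '-')}.{parts[1]}"
--     return dir_name.replace("_", ".")
-- ===== SOURCE B (Python) =====
-- _TLDS = {"com", "app", "dev", "io", "so", "co", "ai", "sh", "tech", "design", "rest"}
--
-- def dir_name_to_domain(dir_name: str) -> str:
--     """Convert a sanitized directory name back to a domain-like string."""
--     parts = dir_name.rsplit("_", 1)
--     if len(parts) == 2:
--         prefix, last = parts
--         if last in _TLDS:
--             return prefix.replace("_", ".") + "." + last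
--         return prefix.replace("_", "-") + "." + last
--     return dir_name.replace("_", ".")
-- ===== Notes on version B (the rewrite author's own statement) =====
-- stated objective: simpler
-- what changed: Replaces A's 11-iteration endswith scan (with per-iteration TLD sanitization and slicing) by one split at the last underscore followed by a single set-membership test on the last token.
import Mathlib
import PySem

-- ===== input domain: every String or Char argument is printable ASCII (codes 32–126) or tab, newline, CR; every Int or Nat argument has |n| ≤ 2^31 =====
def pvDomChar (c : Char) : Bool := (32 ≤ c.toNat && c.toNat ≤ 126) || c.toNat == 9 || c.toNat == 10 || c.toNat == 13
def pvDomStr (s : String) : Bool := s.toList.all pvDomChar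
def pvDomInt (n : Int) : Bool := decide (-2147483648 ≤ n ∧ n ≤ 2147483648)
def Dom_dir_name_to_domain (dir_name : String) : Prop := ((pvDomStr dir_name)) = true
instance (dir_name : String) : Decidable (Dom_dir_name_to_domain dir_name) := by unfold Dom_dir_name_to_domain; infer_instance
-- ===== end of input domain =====

-- B replaces A's 11-way endswith scan by one rsplit('_', 1) plus a single set-membership test (simpler).

-- shared helper: hand port of s.rsplit("_", 1), exact for this separator and maxsplit:
-- none = no '_' in the string (Python returns [s]); some (a, b) = split at the LAST '_'.
def pvRsplit1 : List Char → Option (List Char × List Char)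
  | [] => none
  | c :: rest =>
    match pvRsplit1 rest with
    | some (a, b) => some (c :: a, b)
    | none => if c = '_' then some ([], rest) else none

-- ===== PORT A =====
def pvTlds : List (List Char) :=
  [['.','c','o','m'], ['.','a','p','p'], ['.','d','e','v'], ['.','i','o'], ['.','s','o'],
   ['.','c','o'], ['.','a','i'], ['.','s','h'], ['.','t','e','c','h'],
   ['.','d','e','s','i','g','n'], ['.','r','e','s','t']]

-- the code after A's for-loop (reached when no TLD matched)
def pvFallbackA (cs : List Char) : List Char :=
  match pvRsplit1 cs with
  | some (a, b) => PySem.Chars.replace a ['_'] ['-'] ++ '.' :: b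
  | none => PySem.Chars.replace cs ['_'] ['.']

def pvALoop : List (List Char) → List Char → List Char
  | [], cs => pvFallbackA cs
  | tld :: rest, cs =>
    let san := PySem.Chars.replace tld ['.'] ['_']
    if PySem.Chars.endswith cs san then
      PySem.Chars.replace (PySem.Chars.slice cs none (some (-(san.length : Int)))) ['_'] ['.'] ++ tld
    else pvALoop rest cs

def dir_name_to_domain (dir_name : String) : String :=
  String.ofList (pvALoop pvTlds dir_name.toList)

-- ===== PORT B =====
def pvTldSet : PySem.Set (List Char) :=
  PySem.Set.ofList
    [['c','o','m'], ['a','p','p'], ['d','e','v'], ['i','o'], ['s','o'],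
     ['c','o'], ['a','i'], ['s','h'], ['t','e','c','h'],
     ['d','e','s','i','g','n'], ['r','e','s','t']]

def pvBChars (cs : List Char) : List Char :=
  match pvRsplit1 cs with
  | some (a, b) =>
    if PySem.Set.contains pvTldSet b then PySem.Chars.replace a ['_'] ['.'] ++ '.' :: b
    else PySem.Chars.replace a ['_'] ['-'] ++ '.' :: b
  | none => PySem.Chars.replace cs ['_'] ['.']

def dir_name_to_domain_alt (dir_name : String) : String :=
  String.ofList (pvBChars dir_name.toList)

-- ===== PRECONDITION & SPEC =====
def Spec_dir_name_to_domain (dir_name : String) (out : String) : Prop := out = dir_name_to_domain_alt dir_name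
instance (dir_name : String) (out : String) : Decidable (Spec_dir_name_to_domain dir_name out) := by unfold Spec_dir_name_to_domain; infer_instance

-- ===== CLAIM (what is proved, stated in full; the proofs are below) =====
def Claim_equal_dir_name_to_domain : Prop := ∀ (dir_name : String), Dom_dir_name_to_domain dir_name → Spec_dir_name_to_domain dir_name (dir_name_to_domain dir_name)

-- ===== LEMMAS AND PROOFS =====

lemma pvRsplit1_none {cs : List Char} : pvRsplit1 cs = none ↔ '_' ∉ cs := by
  induction cs with
  | nil => simp [pvRsplit1]
  | cons c rest ih =>
    simp only [pvRsplit1]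
    cases h : pvRsplit1 rest with
    | some p =>
      have hmem : '_' ∈ rest := by
        by_contra hm; rw [ih.mpr hm] at h; simp at h
      simp [hmem]
    | none =>
      have hm := ih.mp h
      by_cases hc : c = '_' <;> simp [hc, hm, List.mem_cons, eq_comm]

lemma pvRsplit1_some {cs a b : List Char} (h : pvRsplit1 cs = some (a, b)) :
    cs = a ++ '_' :: b ∧ '_' ∉ b := by
  induction cs generalizing a b with
  | nil => simp [pvRsplit1] at h
  | cons c rest ih =>
    simp only [pvRsplit1] at h
    cases hr : pvRsplit1 rest with
    | some p =>
      rw [hr] at h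
      obtain ⟨a', b'⟩ := p
      simp only [Option.some.injEq, Prod.mk.injEq] at h
      obtain ⟨h1, h2⟩ := h
      obtain ⟨ha, hb⟩ := ih (a := a') (b := b') hr
      subst h2
      exact ⟨by rw [← h1]; simp [ha], hb⟩
    | none =>
      rw [hr] at h
      by_cases hc : c = '_'
      · subst hc
        rw [if_pos rfl] at h
        simp only [Option.some.injEq, Prod.mk.injEq] at h
        obtain ⟨h1, h2⟩ := h
        subst h1; subst h2
        exact ⟨rfl, pvRsplit1_none.mp hr⟩
      · simp [hc] at h

lemma pvEndswith_eq {a b t : List Char} (hb : '_' ∉ b) (ht : '_' ∉ t) :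
    PySem.Chars.endswith (a ++ '_' :: b) ('_' :: t) = decide (b = t) := by
  by_cases h : b = t
  · subst h
    have hd : decide (b = b) = true := by simp
    rw [hd, PySem.Chars.endswith_iff]
    exact List.suffix_append a ('_' :: b)
  · simp only [h, decide_false]
    rw [Bool.eq_false_iff]
    intro hend
    rw [PySem.Chars.endswith_iff] at hend
    have hsuf2 : ('_' :: b) <:+ (a ++ '_' :: b) := List.suffix_append a ('_' :: b)
    rcases List.suffix_or_suffix_of_suffix hend hsuf2 with hc | hc
    · rcases List.suffix_cons_iff.mp hc with he | he
      · obtain ⟨-, h2⟩ := List.cons_eq_cons.mp he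
        exact h h2.symm
      · exact hb (he.subset List.mem_cons_self)
    · rcases List.suffix_cons_iff.mp hc with he | he
      · obtain ⟨-, h2⟩ := List.cons_eq_cons.mp he
        exact h h2
      · exact ht (he.subset List.mem_cons_self)

lemma pvALoop_no_underscore {cs : List Char} (ts : List (List Char))
    (hts : ∀ t ∈ ts, '_' ∈ PySem.Chars.replace t ['.'] ['_'])
    (hcs : '_' ∉ cs) : pvALoop ts cs = pvFallbackA cs := by
  induction ts with
  | nil => rfl
  | cons t rest ih =>
    simp only [pvALoop]
    have hfalse : PySem.Chars.endswith cs (PySem.Chars.replace t ['.'] ['_']) = false := by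
      rw [Bool.eq_false_iff]
      intro hend
      rw [PySem.Chars.endswith_iff] at hend
      exact hcs (hend.subset (hts t (by simp)))
    rw [hfalse]
    simp only [Bool.false_eq_true, if_false]
    exact ih (fun t' ht' => hts t' (by simp [ht']))

lemma pvALoop_some {a b : List Char} (ts : List (List Char))
    (hts : ∀ t ∈ ts, t = '.' :: t.tail ∧
        PySem.Chars.replace t ['.'] ['_'] = '_' :: t.tail ∧ '_' ∉ t.tail)
    (hb : '_' ∉ b) :
    pvALoop ts (a ++ '_' :: b) =
      if b ∈ ts.map List.tail then PySem.Chars.replace a ['_'] ['.'] ++ '.' :: b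
      else pvFallbackA (a ++ '_' :: b) := by
  induction ts with
  | nil => simp [pvALoop]
  | cons t rest ih =>
    obtain ⟨htb, hsan, hbare⟩ := hts t (by simp)
    simp only [pvALoop, hsan]
    rw [pvEndswith_eq hb hbare]
    by_cases heq : b = t.tail
    · simp only [heq, decide_true, if_true]
      have hslice : PySem.Chars.slice (a ++ '_' :: t.tail) none
          (some (-((('_' :: t.tail).length : Nat) : Int))) = a := by
        rw [PySem.Chars.slice_eq_listSlice]
        rw [show ((('_' :: t.tail).length : Nat) : Int) = ((t.tail.length + 1 : Nat) : Int) by simp]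
        rw [PySem.List.slice_to_neg_natCast _ _ (by omega)]
        have hlen : (a ++ '_' :: t.tail).length - (t.tail.length + 1) = a.length := by
          simp [List.length_append]
        rw [hlen]
        exact List.take_left
      rw [hslice]
      rw [if_pos (by simp)]
      rw [← htb]
    · simp only [heq, decide_false, Bool.false_eq_true, if_false]
      rw [ih (fun t' ht' => hts t' (by simp [ht']))]
      by_cases hm : b ∈ rest.map List.tail
      · rw [if_pos hm, if_pos (by simp [hm])]
      · rw [if_neg hm, if_neg (by simp [List.mem_cons, heq, hm])]

lemma pvMain (cs : List Char) : pvALoop pvTlds cs = pvBChars cs := by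
  cases hr : pvRsplit1 cs with
  | none =>
    have hcs : '_' ∉ cs := pvRsplit1_none.mp hr
    rw [pvALoop_no_underscore pvTlds (by decide) hcs]
    simp [pvFallbackA, pvBChars, hr]
  | some p =>
    obtain ⟨a, b⟩ := p
    obtain ⟨hcseq, hb⟩ := pvRsplit1_some hr
    subst hcseq
    rw [pvALoop_some pvTlds (by decide) hb]
    have hlist : pvTlds.map List.tail = (pvTldSet : List (List Char)) := by decide
    simp only [pvBChars, hr, hlist]
    by_cases hmem : b ∈ (pvTldSet : List (List Char))
    · rw [if_pos hmem, if_pos (by simpa [PySem.Set.contains] using hmem)]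
    · rw [if_neg hmem, if_neg (by simpa [PySem.Set.contains] using hmem)]
      simp [pvFallbackA, hr]

-- ===== VERDICT (by name: the statement is the Claim_ definition above) =====
theorem dir_name_to_domain_spec : Claim_equal_dir_name_to_domain := by
  intro dir_name _
  unfold Spec_dir_name_to_domain dir_name_to_domain dir_name_to_domain_alt
  rw [pvMain]
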